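-- pv_equiv track=rewrite | github.com/visserle/AnkiOps | tests/property/test_sync_stateful.py | _replace_answer
-- ===== SOURCE A (Python) =====
-- def _replace_answer(content: str, new_answer: str) -> str:
--     lines = content.splitlines()
--     for i, line in enumerate(lines):
--         if line.startswith("A: "):
--             lines[i] = f"A: {new_answer}"
--             break
--     suffix = "\n" if content.endswith("\n") else ""
--     return "\n".join(lines) + suffix
-- ===== SOURCE B (Python) =====
-- def _replace_answer(content: str, new_answer: str) -> str:
--     body = "\n".join(content.splitlines())
--     suffix = "\n" if content.endswith("\n") else ""
--     if body.startswith("A: "):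
--         start = 0
--     else:
--         j = body.find("\nA: ")
--         if j == -1:
--             return body + suffix
--         start = j + 1
--     end = body.find("\n", start)
--     if end == -1:
--         end = len(body)
--     return body[:start] + "A: " + new_answer + body[end:] + suffix
-- ===== Notes on version B (the rewrite author's own statement) =====
-- stated objective: alternative
-- what changed: B never builds or rewrites a list of lines: after the join-normalization it works on the flat string, locating the first line-start occurrence of 'A: ' by substring search (startswith / find of '\nA: '), finding the end of that line with find('\n', start), and splicing the replacement between character offsets.
import Mathlib
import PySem

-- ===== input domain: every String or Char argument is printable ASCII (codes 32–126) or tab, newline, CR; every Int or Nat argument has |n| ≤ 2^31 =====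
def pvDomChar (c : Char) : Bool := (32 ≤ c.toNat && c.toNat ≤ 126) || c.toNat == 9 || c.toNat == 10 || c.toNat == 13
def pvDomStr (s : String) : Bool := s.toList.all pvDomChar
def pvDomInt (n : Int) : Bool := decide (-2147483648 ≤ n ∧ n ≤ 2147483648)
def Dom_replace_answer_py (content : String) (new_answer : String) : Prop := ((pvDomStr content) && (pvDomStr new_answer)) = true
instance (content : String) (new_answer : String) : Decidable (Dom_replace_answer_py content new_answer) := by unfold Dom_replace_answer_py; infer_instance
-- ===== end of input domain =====

-- B drops A's line-list rewrite: it searches the joined flat string for the first line-start "A: " and splices by character offsets; objective: alternative, same cost.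

-- ===== PORT A =====
-- the for-loop with break: replace the first line starting with "A: ", keep the rest
def pvReplLoop (new_answer : String) : List String → List String
  | [] => []
  | l :: rest =>
      if PySem.Str.startswith l "A: " then ("A: " ++ new_answer) :: rest
      else l :: pvReplLoop new_answer rest

def replace_answer_py (content : String) (new_answer : String) : String :=
  let lines := PySem.Str.splitlines content
  let lines := pvReplLoop new_answer lines
  let suffix := if PySem.Str.endswith content "\n" then "\n" else ""
  PySem.Str.join "\n" lines ++ suffix

-- ===== PORT B =====
-- Source B's early 'return body + suffix' is encoded as the 'none' branch of start?
def replace_answer_py_alt (content : String) (new_answer : String) : String :=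
  let body := PySem.Str.join "\n" (PySem.Str.splitlines content)
  let suffix := if PySem.Str.endswith content "\n" then "\n" else ""
  let start? : Option Int :=
    if PySem.Str.startswith body "A: " then some 0
    else
      let j := PySem.Str.find body "\nA: "
      if j = -1 then none else some (j + 1)
  match start? with
  | none => body ++ suffix
  | some start =>
      let e := PySem.Str.findFrom body "\n" start
      let e := if e = -1 then PySem.Str.len body else e
      PySem.Str.slice body none (some start) ++ "A: " ++ new_answer
        ++ PySem.Str.slice body (some e) none ++ suffix

-- ===== PRECONDITION & SPEC =====
def Spec_replace_answer_py (content : String) (new_answer : String) (out : String) : Prop := out = replace_answer_py_alt content new_answer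
instance (content : String) (new_answer : String) (out : String) : Decidable (Spec_replace_answer_py content new_answer out) := by unfold Spec_replace_answer_py; infer_instance

-- ===== CLAIM (what is proved, stated in full; the proofs are below) =====
def Claim_equal_replace_answer_py : Prop := ∀ (content : String) (new_answer : String), Dom_replace_answer_py content new_answer → Spec_replace_answer_py content new_answer (replace_answer_py content new_answer)

-- ===== LEMMAS AND PROOFS =====

-- char-level mirrors used only by the proofs
def pvAC : List Char := ['A', ':', ' ']
def pvNLAC : List Char := '\n' :: pvAC

def pvLoopC (na : List Char) : List (List Char) → List (List Char)
  | [] => []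
  | l :: rest =>
      if PySem.Chars.startswith l pvAC then (pvAC ++ na) :: rest
      else l :: pvLoopC na rest

def pvEndAtC (body : List Char) (k : Nat) : Nat :=
  if PySem.Chars.find (body.drop k) ['\n'] = -1 then body.length
  else k + (PySem.Chars.find (body.drop k) ['\n']).toNat

def pvSpliceC (body na : List Char) (k : Nat) : List Char :=
  body.take k ++ pvAC ++ na ++ body.drop (pvEndAtC body k)

def pvBcoreC (body na : List Char) : List Char :=
  if PySem.Chars.startswith body pvAC then pvSpliceC body na 0
  else
    let j := PySem.Chars.find body pvNLAC
    if j = -1 then body else pvSpliceC body na (j.toNat + 1)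

-- find/prefix toolbox
lemma pvFind_eq_of (s sub : List Char) (n : Nat) (h1 : sub <+: s.drop n)
    (h2 : ∀ i < n, ¬ sub <+: s.drop i) : PySem.Chars.find s sub = n := by
  have hin : sub <:+: s := (PySem.Chars.exists_prefix_drop_iff_isIn sub s).mp ⟨n, h1⟩
      |> (PySem.Chars.isIn_iff_infix sub s).mp
  have h0 : 0 ≤ PySem.Chars.find s sub := (PySem.Chars.find_nonneg_iff s sub).mpr hin
  obtain ⟨hp, hmin⟩ := PySem.Chars.find_spec h0
  have : (PySem.Chars.find s sub).toNat = n := by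
    rcases lt_trichotomy (PySem.Chars.find s sub).toNat n with h | h | h
    · exact absurd hp (h2 _ h)
    · exact h
    · exact absurd h1 (hmin n h)
  omega

lemma pvFind_eq_neg_one (s sub : List Char) (h : ∀ i, ¬ sub <+: s.drop i) :
    PySem.Chars.find s sub = -1 := by
  rw [PySem.Chars.find_eq_neg_one_iff]
  intro hin
  obtain ⟨j, hj⟩ := (PySem.Chars.exists_prefix_drop_iff_isIn sub s).mpr
    ((PySem.Chars.isIn_iff_infix sub s).mpr hin)
  exact h j hj

lemma pvPrefix_barrier (pat l0 t : List Char) (hp : '\n' ∉ pat) :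
    pat <+: l0 ++ '\n' :: t ↔ pat <+: l0 := by
  constructor
  · intro h
    by_cases hl : pat.length ≤ l0.length
    · exact (List.isPrefix_append_of_length hl).mp h
    · exfalso
      have hlt : l0.length < pat.length := by omega
      have hpe : pat = (l0 ++ '\n' :: t).take pat.length := List.prefix_iff_eq_take.mp h
      have hx := List.getElem_of_eq hpe hlt
      rw [List.getElem_take, List.getElem_append_right (le_refl l0.length)] at hx
      simp at hx
      exact hp (hx ▸ List.getElem_mem hlt)
  · intro h
    exact h.trans (List.prefix_append l0 ('\n' :: t))

lemma pvNoPrefix_head (l0 u pat' : List Char) (i : Nat) (hi : i < l0.length)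
    (h0 : '\n' ∉ l0) : ¬ ('\n' :: pat') <+: (l0 ++ u).drop i := by
  intro h
  rw [List.drop_append_of_le_length (by omega), List.drop_eq_getElem_cons hi] at h
  have := (List.cons_prefix_cons.mp h).1
  exact h0 (this ▸ List.getElem_mem hi)

lemma pvFind_nl_append (l0 T : List Char) (h0 : '\n' ∉ l0) :
    PySem.Chars.find (l0 ++ '\n' :: T) ['\n'] = (l0.length : Int) := by
  apply pvFind_eq_of
  · rw [List.drop_left]
    exact List.cons_prefix_cons.mpr ⟨rfl, List.nil_prefix⟩
  · intro i hi
    exact pvNoPrefix_head l0 ('\n' :: T) [] i hi h0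

lemma pvFind_nl_none (l0 : List Char) (h0 : '\n' ∉ l0) :
    PySem.Chars.find l0 ['\n'] = -1 := by
  rw [PySem.Chars.find_eq_neg_one_iff]
  intro h
  exact h0 ((List.singleton_infix_iff '\n' l0).mp h)

lemma pvDrop_shift (l0 T : List Char) (i : Nat) (hi : l0.length < i) :
    (l0 ++ '\n' :: T).drop i = T.drop (i - l0.length - 1) := by
  have h : i = l0.length + ((i - l0.length - 1) + 1) := by omega
  conv_lhs => rw [h]
  rw [List.drop_length_add_append, List.drop_succ_cons]

-- F: where "\nA: " first occurs in l0 ++ "\n" ++ T, in terms of T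
lemma pvFind_NLAC_append (l0 T : List Char) (h0 : '\n' ∉ l0) :
    PySem.Chars.find (l0 ++ '\n' :: T) pvNLAC =
      if PySem.Chars.startswith T pvAC then (l0.length : Int)
      else if PySem.Chars.find T pvNLAC = -1 then -1
      else (l0.length : Int) + 1 + PySem.Chars.find T pvNLAC := by
  split_ifs with h1 h2
  · apply pvFind_eq_of
    · rw [List.drop_left]
      exact List.cons_prefix_cons.mpr ⟨rfl, (PySem.Chars.startswith_iff T pvAC).mp h1⟩
    · intro i hi
      exact pvNoPrefix_head l0 ('\n' :: T) pvAC i hi h0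
  · apply pvFind_eq_neg_one
    intro i hpre
    rcases lt_trichotomy i l0.length with hi | hi | hi
    · exact pvNoPrefix_head l0 ('\n' :: T) pvAC i hi h0 hpre
    · subst hi
      rw [List.drop_left] at hpre
      exact h1 ((PySem.Chars.startswith_iff T pvAC).mpr (List.cons_prefix_cons.mp hpre).2)
    · rw [pvDrop_shift l0 T i hi] at hpre
      have : PySem.Chars.find T pvNLAC ≠ -1 := by
        rw [PySem.Chars.find_ne_neg_one_iff]
        exact ((PySem.Chars.isIn_iff_infix pvNLAC T).mp
          ((PySem.Chars.exists_prefix_drop_iff_isIn pvNLAC T).mp ⟨_, hpre⟩))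
      exact this h2
  · have hnn : 0 ≤ PySem.Chars.find T pvNLAC := by
      rcases (lt_or_ge (PySem.Chars.find T pvNLAC) 0) with h | h
      · exfalso
        have := PySem.Chars.neg_one_le_find T pvNLAC
        omega
      · exact h
    obtain ⟨hp, hmin⟩ := PySem.Chars.find_spec hnn
    have heq : PySem.Chars.find (l0 ++ '\n' :: T) pvNLAC
        = ((l0.length + 1 + (PySem.Chars.find T pvNLAC).toNat : Nat) : Int) := by
      apply pvFind_eq_of
      · rw [pvDrop_shift l0 T _ (by omega)]
        have : l0.length + 1 + (PySem.Chars.find T pvNLAC).toNat - l0.length - 1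
            = (PySem.Chars.find T pvNLAC).toNat := by omega
        rw [this]; exact hp
      · intro i hi hpre
        rcases lt_trichotomy i l0.length with h | h | h
        · exact pvNoPrefix_head l0 ('\n' :: T) pvAC i h h0 hpre
        · subst h
          rw [List.drop_left] at hpre
          exact h1 ((PySem.Chars.startswith_iff T pvAC).mpr (List.cons_prefix_cons.mp hpre).2)
        · rw [pvDrop_shift l0 T i h] at hpre
          exact hmin (i - l0.length - 1) (by omega) hpre
    rw [heq]; push_cast; omega

lemma pvEndAtC_append (l0 T : List Char) (k : Nat) :
    pvEndAtC (l0 ++ '\n' :: T) (l0.length + 1 + k) = l0.length + 1 + pvEndAtC T k := by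
  unfold pvEndAtC
  rw [pvDrop_shift l0 T _ (by omega)]
  have : l0.length + 1 + k - l0.length - 1 = k := by omega
  rw [this]
  split
  · simp only [List.length_append, List.length_cons]; omega
  · omega

lemma pvSpliceC_append (l0 T na : List Char) (k : Nat) :
    pvSpliceC (l0 ++ '\n' :: T) na (l0.length + 1 + k)
      = l0 ++ '\n' :: pvSpliceC T na k := by
  unfold pvSpliceC
  rw [pvEndAtC_append l0 T k]
  have h1 : (l0 ++ '\n' :: T).take (l0.length + 1 + k) = l0 ++ '\n' :: T.take k := by
    have : l0.length + 1 + k = l0.length + (k + 1) := by omega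
    rw [this, List.take_length_add_append, List.take_succ_cons]
  have h2 : (l0 ++ '\n' :: T).drop (l0.length + 1 + pvEndAtC T k) = T.drop (pvEndAtC T k) := by
    rw [pvDrop_shift l0 T _ (by omega)]
    congr 1; omega
  rw [h1, h2]
  simp

lemma pvLoopC_ne_nil (na : List Char) (L : List (List Char)) (h : L ≠ []) :
    pvLoopC na L ≠ [] := by
  cases L with
  | nil => exact absurd rfl h
  | cons l rest =>
      unfold pvLoopC
      split <;> simp

lemma pvJoin_cons_ne (l : List Char) (X : List (List Char)) (h : X ≠ []) :
    PySem.Chars.join ['\n'] (l :: X) = l ++ '\n' :: PySem.Chars.join ['\n'] X := by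
  cases X with
  | nil => exact absurd rfl h
  | cons m rest =>
      rw [PySem.Chars.join_cons_cons]
      simp

-- MAIN: B's flat-string search-and-splice equals A's line loop, on newline-free lines
lemma pvBcoreC_join (L : List (List Char)) (na : List Char)
    (hL : ∀ l ∈ L, '\n' ∉ l) :
    pvBcoreC (PySem.Chars.join ['\n'] L) na = PySem.Chars.join ['\n'] (pvLoopC na L) := by
  induction L with
  | nil =>
      simp only [PySem.Chars.join_nil, pvBcoreC, pvLoopC,
        show PySem.Chars.startswith [] pvAC = false from by decide,
        show PySem.Chars.find ([] : List Char) pvNLAC = -1 from by decide]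
      simp
  | cons l0 rest ih =>
      have h0 : '\n' ∉ l0 := hL l0 (by simp)
      have hrest : ∀ l ∈ rest, '\n' ∉ l := fun l hl => hL l (by simp [hl])
      cases rest with
      | nil =>
          rw [PySem.Chars.join_singleton]
          by_cases hm : PySem.Chars.startswith l0 pvAC
          · unfold pvBcoreC pvSpliceC pvEndAtC
            rw [if_pos hm]
            rw [show l0.drop 0 = l0 from rfl, pvFind_nl_none l0 h0]
            simp [pvLoopC, hm, PySem.Chars.join_singleton]
          · unfold pvBcoreC
            rw [if_neg hm]
            have : PySem.Chars.find l0 pvNLAC = -1 := by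
              rw [PySem.Chars.find_eq_neg_one_iff]
              intro h
              exact h0 (h.subset (by simp [pvNLAC]))
            simp [this, pvLoopC, hm, PySem.Chars.join_singleton]
      | cons r0 rs =>
          have hjoin : PySem.Chars.join ['\n'] (l0 :: r0 :: rs)
              = l0 ++ '\n' :: PySem.Chars.join ['\n'] (r0 :: rs) :=
            pvJoin_cons_ne l0 (r0 :: rs) (by simp)
          set T := PySem.Chars.join ['\n'] (r0 :: rs) with hT
          by_cases hm : PySem.Chars.startswith l0 pvAC
          · -- first line matches: splice at 0 replaces l0
            rw [hjoin]
            unfold pvBcoreC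
            have hsw : PySem.Chars.startswith (l0 ++ '\n' :: T) pvAC = true := by
              rw [PySem.Chars.startswith_iff]
              exact ((PySem.Chars.startswith_iff l0 pvAC).mp hm).trans
                (List.prefix_append l0 ('\n' :: T))
            rw [if_pos hsw]
            unfold pvSpliceC pvEndAtC
            rw [show (l0 ++ '\n' :: T).drop 0 = l0 ++ '\n' :: T from rfl,
              pvFind_nl_append l0 T h0]
            have hne : ((l0.length : Int) = -1) = False := by simp
            simp only [hne, if_false, Int.toNat_natCast, List.take_zero, zero_add,
              List.drop_left, List.nil_append]
            rw [show pvLoopC na (l0 :: r0 :: rs) = (pvAC ++ na) :: r0 :: rs from by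
              rw [pvLoopC.eq_2, if_pos hm]]
            rw [pvJoin_cons_ne _ (r0 :: rs) (by simp)]
            try simp
          · -- first line does not match: recurse into T
            rw [hjoin]
            unfold pvBcoreC
            have hsw : PySem.Chars.startswith (l0 ++ '\n' :: T) pvAC = false := by
              rw [Bool.eq_false_iff, Ne, PySem.Chars.startswith_iff,
                pvPrefix_barrier pvAC l0 T (by decide)]
              rw [PySem.Chars.startswith_iff] at hm
              exact hm
            rw [if_neg (by simp [hsw])]
            rw [pvFind_NLAC_append l0 T h0]
            have hloop : pvLoopC na (l0 :: r0 :: rs) = l0 :: pvLoopC na (r0 :: rs) := by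
              rw [pvLoopC.eq_2, if_neg hm]
            rw [hloop, pvJoin_cons_ne _ _ (pvLoopC_ne_nil na (r0 :: rs) (by simp)),
              ← ih hrest]
            unfold pvBcoreC
            by_cases h1 : PySem.Chars.startswith T pvAC
            · rw [if_pos h1]
              have hne : ((l0.length : Int) = -1) = False := by simp
              simp only [h1, if_true, hne, Int.toNat_natCast]
              rw [show l0.length + 1 = l0.length + 1 + 0 from rfl, pvSpliceC_append]
              simp
            · rw [if_neg h1]
              simp only [h1]
              by_cases h2 : PySem.Chars.find T pvNLAC = -1
              · simp [h2]
              · have hnn : 0 ≤ PySem.Chars.find T pvNLAC := by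
                  have := PySem.Chars.neg_one_le_find T pvNLAC
                  omega
                rw [if_neg h2]
                have hne2 : ((l0.length : Int) + 1 + PySem.Chars.find T pvNLAC = -1) = False := by
                  simp; omega
                simp only [hne2, if_false, h2]
                have htn : ((l0.length : Int) + 1 + PySem.Chars.find T pvNLAC).toNat + 1
                    = l0.length + 1 + ((PySem.Chars.find T pvNLAC).toNat + 1) := by omega
                rw [htn, pvSpliceC_append]
                simp

-- splitlines pieces never contain '\n'
lemma pvFlush (cur : List Char) (acc : List (List Char)) (hcur : '\n' ∉ cur)
    (hacc : ∀ l ∈ acc, '\n' ∉ l) : ∀ l ∈ cur.reverse :: acc, '\n' ∉ l := by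
  intro l hl
  rcases List.mem_cons.mp hl with h | h
  · subst h; simpa using hcur
  · exact hacc l h

lemma pvGo_no_nl (isB : Char → Bool) (hB : isB '\n' = true) :
    ∀ (n : Nat) (s cur : List Char) (acc : List (List Char)), s.length ≤ n →
      '\n' ∉ cur → (∀ l ∈ acc, '\n' ∉ l) →
      ∀ l ∈ PySem.Chars.splitlines.go isB s cur acc, '\n' ∉ l := by
  intro n
  induction n with
  | zero =>
      intro s cur acc hlen hcur hacc l hl
      have hs : s = [] := List.length_eq_zero_iff.mp (by omega)
      subst hs
      rw [PySem.Chars.splitlines.go.eq_def] at hl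
      split at hl
      · split at hl
        · exact hacc l (List.mem_reverse.mp hl)
        · exact pvFlush _ _ hcur hacc l (List.mem_reverse.mp hl)
      · rename_i rest heq
        exact absurd heq.symm (List.cons_ne_nil _ _)
      · rename_i hno heq
        exact absurd heq.symm (List.cons_ne_nil _ _)
  | succ n ih =>
      intro s cur acc hlen hcur hacc l hl
      rw [PySem.Chars.splitlines.go.eq_def] at hl
      split at hl
      · split at hl
        · exact hacc l (List.mem_reverse.mp hl)
        · exact pvFlush _ _ hcur hacc l (List.mem_reverse.mp hl)
      · refine ih _ [] _ ?_ (by simp) (pvFlush _ _ hcur hacc) l hl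
        simp at hlen ⊢; omega
      · split at hl
        · refine ih _ [] _ ?_ (by simp) (pvFlush _ _ hcur hacc) l hl
          simp at hlen ⊢; omega
        · rename_i hc
          refine ih _ (_ :: cur) acc ?_ ?_ hacc l hl
          · simp at hlen ⊢; omega
          · intro h
            rcases List.mem_cons.mp h with h | h
            · subst h; exact hc hB
            · exact hcur h

lemma pvSplitlines_no_nl (cs : List Char) :
    ∀ l ∈ PySem.Chars.splitlines cs, '\n' ∉ l := by
  unfold PySem.Chars.splitlines
  exact pvGo_no_nl _ (by decide) cs.length cs [] [] le_rfl (by simp) (by simp)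

-- the A-side loop commutes with toList
lemma pvMap_loop (na : String) (L : List String) :
    (pvReplLoop na L).map String.toList = pvLoopC na.toList (L.map String.toList) := by
  induction L with
  | nil => rfl
  | cons l rest ih =>
      have hAC : ("A: " : String).toList = pvAC := by decide
      rw [List.map_cons, pvReplLoop.eq_2, pvLoopC.eq_2, PySem.Str.startswith_eq, hAC]
      by_cases h : PySem.Chars.startswith l.toList pvAC = true
      · simp [h, hAC]
      · simp [h, ih]

-- A's port, at char level
lemma pvA_toList (c na : String) :
    (replace_answer_py c na).toList =
      PySem.Chars.join ['\n'] (pvLoopC na.toList (PySem.Chars.splitlines c.toList))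
        ++ (if PySem.Str.endswith c "\n" then ['\n'] else []) := by
  unfold replace_answer_py
  rw [String.toList_append, PySem.Str.toList_join, pvMap_loop,
    PySem.Str.splitlines_map_toList]
  congr 1
  split <;> rfl

-- B's port, at char level
lemma pvSlice_to_int {α : Type} (xs : List α) (e : Int) (he : 0 ≤ e) :
    PySem.List.slice xs none (some e) = xs.take e.toNat := by
  conv_lhs => rw [show e = ((e.toNat : Nat) : Int) from by omega]
  exact PySem.List.slice_to_natCast xs e.toNat

lemma pvSlice_from_int {α : Type} (xs : List α) (e : Int) (he : 0 ≤ e) :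
    PySem.List.slice xs (some e) none = xs.drop e.toNat := by
  conv_lhs => rw [show e = ((e.toNat : Nat) : Int) from by omega]
  exact PySem.List.slice_from_natCast xs e.toNat

lemma pvAlt_toList (c na : String) :
    (replace_answer_py_alt c na).toList =
      pvBcoreC (PySem.Chars.join ['\n'] (PySem.Chars.splitlines c.toList)) na.toList
        ++ (if PySem.Str.endswith c "\n" then ['\n'] else []) := by
  have hAC' : ("A: " : String).toList = pvAC := by decide
  have hNLAC' : ("\nA: " : String).toList = pvNLAC := by decide
  have hNL' : ("\n" : String).toList = ['\n'] := by decide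
  have hbody : (PySem.Str.join "\n" (PySem.Str.splitlines c)).toList
      = PySem.Chars.join ['\n'] (PySem.Chars.splitlines c.toList) := by
    rw [PySem.Str.toList_join, PySem.Str.splitlines_map_toList, hNL']
  set J := PySem.Chars.join ['\n'] (PySem.Chars.splitlines c.toList) with hJ
  have hsfx : ((if PySem.Str.endswith c "\n" then ("\n" : String) else "")).toList
      = (if PySem.Str.endswith c "\n" then ['\n'] else []) := by
    split <;> decide
  unfold replace_answer_py_alt pvBcoreC pvSpliceC pvEndAtC
  dsimp only
  rw [PySem.Str.startswith_eq, hbody, hAC']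
  by_cases hs : PySem.Chars.startswith J pvAC = true
  · simp only [hs, if_true]
    try dsimp only
    rw [PySem.Str.findFrom_eq, hbody, hNL', PySem.Chars.findFrom_zero, List.drop_zero]
    by_cases hf : PySem.Chars.find J ['\n'] = -1
    · simp only [hf, if_true]
      try dsimp only
      simp only [String.toList_append, PySem.Str.toList_slice, hbody, hAC', hsfx,
        PySem.Chars.slice_eq_listSlice, PySem.Str.len_eq]
      rw [pvSlice_to_int J 0 le_rfl, pvSlice_from_int J _ (by positivity)]
      simp
    · have hnn : 0 ≤ PySem.Chars.find J ['\n'] := by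
        have := PySem.Chars.neg_one_le_find J ['\n']
        omega
      simp only [hf, if_false]
      try dsimp only
      simp only [String.toList_append, PySem.Str.toList_slice, hbody, hAC', hsfx,
        PySem.Chars.slice_eq_listSlice]
      rw [pvSlice_to_int J 0 le_rfl, pvSlice_from_int J _ hnn]
      simp
  · simp only [hs, Bool.false_eq_true, if_false]
    try dsimp only
    rw [PySem.Str.find_eq, hbody, hNLAC']
    by_cases hj : PySem.Chars.find J pvNLAC = -1
    · simp only [hj, if_true]
      try dsimp only
      rw [String.toList_append, hbody, hsfx]
    · have hnn : 0 ≤ PySem.Chars.find J pvNLAC := by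
        have := PySem.Chars.neg_one_le_find J pvNLAC
        omega
      simp only [hj, if_false]
      try dsimp only
      have hb : (PySem.Chars.find J pvNLAC).toNat + 1 ≤ J.length := by
        obtain ⟨hp, -⟩ := PySem.Chars.find_spec hnn
        have := hp.length_le
        rw [List.length_drop] at this
        have h4 : pvNLAC.length = 4 := by decide
        omega
      have hcast : PySem.Chars.find J pvNLAC + 1
          = (((PySem.Chars.find J pvNLAC).toNat + 1 : Nat) : Int) := by omega
      rw [PySem.Str.findFrom_eq, hbody, hNL', hcast,
        PySem.Chars.findFrom_natCast J ['\n'] _ hb]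
      by_cases hf : PySem.Chars.find (J.drop ((PySem.Chars.find J pvNLAC).toNat + 1)) ['\n'] = -1
      · simp only [hf, if_true]
        try dsimp only
        simp only [String.toList_append, PySem.Str.toList_slice, hbody, hAC', hsfx,
          PySem.Chars.slice_eq_listSlice, PySem.Str.len_eq]
        rw [pvSlice_to_int J _ (by positivity), pvSlice_from_int J _ (by positivity)]
        simp
        omega
      · have hfn : 0 ≤ PySem.Chars.find (J.drop ((PySem.Chars.find J pvNLAC).toNat + 1)) ['\n'] := by
          have := PySem.Chars.neg_one_le_find (J.drop ((PySem.Chars.find J pvNLAC).toNat + 1)) ['\n']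
          omega
        simp only [hf, if_false]
        try dsimp only
        have hne : ((((PySem.Chars.find J pvNLAC).toNat + 1 : Nat) : Int)
            + PySem.Chars.find (J.drop ((PySem.Chars.find J pvNLAC).toNat + 1)) ['\n'] = -1) = False := by
          simp; omega
        simp only [hne, if_false]
        simp only [String.toList_append, PySem.Str.toList_slice, hbody, hAC', hsfx,
          PySem.Chars.slice_eq_listSlice]
        rw [pvSlice_to_int J _ (by positivity), pvSlice_from_int J _ (by omega)]
        have htn : ((((PySem.Chars.find J pvNLAC).toNat + 1 : Nat) : Int)
            + PySem.Chars.find (J.drop ((PySem.Chars.find J pvNLAC).toNat + 1)) ['\n']).toNat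
            = (PySem.Chars.find J pvNLAC).toNat + 1
              + (PySem.Chars.find (J.drop ((PySem.Chars.find J pvNLAC).toNat + 1)) ['\n']).toNat := by
          omega
        rw [htn]
        simp
        omega

-- ===== VERDICT (by name: the statement is the Claim_ definition above) =====
theorem replace_answer_py_spec : Claim_equal_replace_answer_py := by
  intro content new_answer _
  unfold Spec_replace_answer_py
  apply String.toList_inj.mp
  rw [pvA_toList, pvAlt_toList,
    pvBcoreC_join _ _ (pvSplitlines_no_nl content.toList)]
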